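-- pv_equiv track=rewrite | github.com/viratsahg/aai | assg05.py | clause_stats
-- ===== SOURCE A (Python) =====
-- from typing import List, Dict, Tuple
--
-- def clause_stats(clauses: List[List[int]]) -> Dict:
--     """Count total clauses and breakdown by literal count."""
--     return {
--         'total' : len(clauses),
--         '1-lit' : sum(1 for c in clauses if len(c) == 1),
--         '2-lit' : sum(1 for c in clauses if len(c) == 2),
--         '3-lit' : sum(1 for c in clauses if len(c) == 3),
--         '3+lit' : sum(1 for c in clauses if len(c) > 3),
--     }
-- ===== SOURCE B (Python) =====
-- from typing import List, Dict
--
-- def clause_stats(clauses: List[List[int]]) -> Dict: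
--     """Count total clauses and breakdown by literal count (single pass)."""
--     c1 = c2 = c3 = c3p = 0
--     for c in clauses:
--         n = len(c)
--         if n == 1:
--             c1 += 1
--         elif n == 2:
--             c2 += 1
--         elif n == 3:
--             c3 += 1
--         elif n > 3:
--             c3p += 1
--     return {
--         'total': len(clauses),
--         '1-lit': c1,
--         '2-lit': c2,
--         '3-lit': c3,
--         '3+lit': c3p,
--     }
-- ===== Notes on version B (the rewrite author's own statement) =====
-- stated objective: alternative
-- what changed: Replaces four separate filtered scans (one generator expression per bucket) with a single loop maintaining four counters.
import Mathlib
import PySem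

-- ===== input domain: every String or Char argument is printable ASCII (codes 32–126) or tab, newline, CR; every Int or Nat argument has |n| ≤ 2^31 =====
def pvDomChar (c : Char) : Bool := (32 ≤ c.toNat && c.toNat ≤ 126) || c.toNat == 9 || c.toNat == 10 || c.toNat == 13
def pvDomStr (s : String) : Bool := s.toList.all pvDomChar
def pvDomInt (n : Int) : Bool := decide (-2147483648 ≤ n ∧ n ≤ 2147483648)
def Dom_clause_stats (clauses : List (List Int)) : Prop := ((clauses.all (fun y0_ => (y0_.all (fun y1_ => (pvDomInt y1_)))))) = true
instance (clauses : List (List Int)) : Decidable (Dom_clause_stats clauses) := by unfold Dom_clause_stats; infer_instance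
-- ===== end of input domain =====

-- B replaces A's four filtered scans with a single four-counter accumulating pass (alternative decomposition).

-- ===== PORT A =====
-- sum(1 for c in clauses if len(c) == k) → fold counting matching clauses
def pvSumIfLenEq (clauses : List (List Int)) (k : Nat) : Int :=
  clauses.foldl (fun acc c => if c.length = k then acc + 1 else acc) 0

def pvSumIfLenGt (clauses : List (List Int)) (k : Nat) : Int :=
  clauses.foldl (fun acc c => if c.length > k then acc + 1 else acc) 0

def clause_stats (clauses : List (List Int)) : List (String × Int) :=
  [("total", (clauses.length : Int)),
   ("1-lit", pvSumIfLenEq clauses 1),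
   ("2-lit", pvSumIfLenEq clauses 2),
   ("3-lit", pvSumIfLenEq clauses 3),
   ("3+lit", pvSumIfLenGt clauses 3)]

-- ===== PORT B =====
-- single loop over clauses maintaining four counters
def pvCountLoop (clauses : List (List Int)) (acc : Int × Int × Int × Int) : Int × Int × Int × Int :=
  match clauses with
  | [] => acc
  | c :: rest =>
    let (c1, c2, c3, c3p) := acc
    let n := c.length
    if n = 1 then pvCountLoop rest (c1 + 1, c2, c3, c3p)
    else if n = 2 then pvCountLoop rest (c1, c2 + 1, c3, c3p)
    else if n = 3 then pvCountLoop rest (c1, c2, c3 + 1, c3p)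
    else if n > 3 then pvCountLoop rest (c1, c2, c3, c3p + 1)
    else pvCountLoop rest (c1, c2, c3, c3p)

def clause_stats_alt (clauses : List (List Int)) : List (String × Int) :=
  let (c1, c2, c3, c3p) := pvCountLoop clauses (0, 0, 0, 0)
  [("total", (clauses.length : Int)),
   ("1-lit", c1),
   ("2-lit", c2),
   ("3-lit", c3),
   ("3+lit", c3p)]

-- ===== PRECONDITION & SPEC =====
def Spec_clause_stats (clauses : List (List Int)) (out : List (String × Int)) : Prop := out = clause_stats_alt clauses
instance (clauses : List (List Int)) (out : List (String × Int)) : Decidable (Spec_clause_stats clauses out) := by unfold Spec_clause_stats; infer_instance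

-- ===== CLAIM (what is proved, stated in full; the proofs are below) =====
def Claim_equal_clause_stats : Prop := ∀ (clauses : List (List Int)), Dom_clause_stats clauses → Spec_clause_stats clauses (clause_stats clauses)

-- ===== LEMMAS AND PROOFS =====

-- counting folds shift their initial accumulator out
lemma foldl_count_shift (p : List Int → Prop) [DecidablePred p] (xs : List (List Int)) (a : Int) :
    xs.foldl (fun acc c => if p c then acc + 1 else acc) a
      = a + xs.foldl (fun acc c => if p c then acc + 1 else acc) 0 := by
  induction xs generalizing a with
  | nil => simp
  | cons x rest ih =>
    simp only [List.foldl_cons]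
    rw [ih, ih (if p x then 0 + 1 else 0)]
    split <;> ring

lemma sumIfLenEq_cons (c : List Int) (rest : List (List Int)) (k : Nat) :
    pvSumIfLenEq (c :: rest) k
      = (if c.length = k then (1 : Int) else 0) + pvSumIfLenEq rest k := by
  simp only [pvSumIfLenEq, List.foldl_cons]
  rw [foldl_count_shift (fun c => c.length = k) rest]
  · split <;> ring
  
lemma sumIfLenGt_cons (c : List Int) (rest : List (List Int)) (k : Nat) :
    pvSumIfLenGt (c :: rest) k
      = (if c.length > k then (1 : Int) else 0) + pvSumIfLenGt rest k := by
  simp only [pvSumIfLenGt, List.foldl_cons]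
  rw [foldl_count_shift (fun c => c.length > k) rest]
  · split <;> ring

-- the loop invariant: the four counters accumulate A's four filtered counts
lemma pvCountLoop_eq (clauses : List (List Int)) (c1 c2 c3 c3p : Int) :
    pvCountLoop clauses (c1, c2, c3, c3p)
      = (c1 + pvSumIfLenEq clauses 1, c2 + pvSumIfLenEq clauses 2,
         c3 + pvSumIfLenEq clauses 3, c3p + pvSumIfLenGt clauses 3) := by
  induction clauses generalizing c1 c2 c3 c3p with
  | nil => simp [pvCountLoop, pvSumIfLenEq, pvSumIfLenGt]
  | cons c rest ih =>
    rw [sumIfLenEq_cons, sumIfLenEq_cons, sumIfLenEq_cons, sumIfLenGt_cons]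
    simp only [pvCountLoop]
    split_ifs with h1 h2 h3 h4 <;> rw [ih] <;>
      simp_all <;> ring

theorem clause_stats_spec : Claim_equal_clause_stats := by
  intro clauses _
  unfold Spec_clause_stats clause_stats clause_stats_alt
  rw [pvCountLoop_eq]
  simp
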